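-- pv_equiv track=rewrite | github.com/ArjunShome/Interview_preparation | Algo_Expert/valid_starting_city.py | validStartingCity
-- ===== SOURCE A (Python) =====
-- def validStartingCity(distances, fuel, mpg):
--     # Write your code here.
--     distance_to_cover = 0
--     fuel_available = 0
--     starting_city_index = 0
--     current_city_index = starting_city_index
--     cities_covered = 0
--
--     total_number_of_cities = len(distances)
--
--     while cities_covered < total_number_of_cities:
--         if current_city_index == total_number_of_cities:
--             current_city_index = 0
--
--         distance_to_next = distances[current_city_index]
--         fuel_refilled = fuel[current_city_index] * mpg
--
--         distance_to_cover += distance_to_next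
--         fuel_available += fuel_refilled
--
--         if fuel_available < distance_to_cover:
--             distance_to_cover = 0
--             fuel_available = 0
--             current_city_index += 1
--             starting_city_index = current_city_index
--             cities_covered = 0
--         else:
--             current_city_index += 1
--             cities_covered += 1
--
--     return starting_city_index
-- ===== SOURCE B (Python) =====
-- def validStartingCity(distances, fuel, mpg):
--     best = 0
--     best_i = 0
--     bal = 0
--     for i, (d, f) in enumerate(zip(distances, fuel)):
--         bal += f * mpg - d
--         if bal < best:
--             best = bal
--             best_i = i + 1
--     return best_i
-- ===== Notes on version B (the rewrite author's own statement) =====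
-- stated objective: simpler
-- what changed: Replaced the reset-and-rescan greedy while-loop (restart candidate after each failure, then a wrap-around verification pass) with a single for-loop over the cities that tracks the running fuel balance and returns the index just after its first minimum.
import Mathlib
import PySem

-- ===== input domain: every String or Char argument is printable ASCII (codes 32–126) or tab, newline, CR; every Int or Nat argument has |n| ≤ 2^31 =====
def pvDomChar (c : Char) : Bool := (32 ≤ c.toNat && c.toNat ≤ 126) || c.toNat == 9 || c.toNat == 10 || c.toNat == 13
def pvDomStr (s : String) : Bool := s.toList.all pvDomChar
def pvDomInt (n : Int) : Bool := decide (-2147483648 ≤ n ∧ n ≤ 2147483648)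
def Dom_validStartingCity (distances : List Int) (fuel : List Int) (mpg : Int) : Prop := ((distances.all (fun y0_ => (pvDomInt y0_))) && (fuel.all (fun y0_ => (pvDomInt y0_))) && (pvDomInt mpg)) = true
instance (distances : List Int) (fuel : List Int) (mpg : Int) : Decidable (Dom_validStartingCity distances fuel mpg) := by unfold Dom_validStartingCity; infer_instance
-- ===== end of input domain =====

-- B replaces A's reset-and-rescan greedy while-loop by a single pass tracking the
-- running fuel balance and returning the index after its first minimum (objective: simpler).

-- ===== PORT A =====
-- Literal transliteration of A's while-loop: state (dtc, fa, start, cur, covered),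
-- recursion on a step counter (2*len+2 steps suffice under Pre_, proved below; the
-- Python loop diverges or raises exactly outside Pre_, where nothing is claimed).
-- distances[i]/fuel[i] use pyGet?; the .getD 0 default is hit only where Python raises IndexError.
def aLoop (d f : List Int) (m n : Int) : Nat → Int → Int → Int → Int → Int → Int
  | 0, _dtc, _fa, start, _cur, _covered => start
  | Nat.succ steps, dtc, fa, start, cur, covered =>
    if covered < n then
      let cur' := if cur = n then 0 else cur
      let dn := (PySem.List.pyGet? d cur').getD 0
      let fr := ((PySem.List.pyGet? f cur').getD 0) * m
      let dtc' := dtc + dn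
      let fa' := fa + fr
      if fa' < dtc' then
        aLoop d f m n steps 0 0 (cur' + 1) (cur' + 1) 0
      else
        aLoop d f m n steps dtc' fa' start (cur' + 1) (covered + 1)
    else start

def validStartingCity (distances : List Int) (fuel : List Int) (mpg : Int) : Int :=
  aLoop distances fuel mpg (distances.length : Int) (2 * distances.length + 2) 0 0 0 0 0

-- ===== PORT B =====
-- state (best, best_i, bal); one fold over enumerate(zip(distances, fuel))
def bStep (mpg : Int) (st : Int × Int × Int) (p : Int × Int × Int) : Int × Int × Int :=
  let bal := st.2.2 + p.2.2 * mpg - p.2.1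
  if bal < st.1 then (bal, p.1 + 1, bal) else (st.1, st.2.1, bal)

def validStartingCity_alt (distances : List Int) (fuel : List Int) (mpg : Int) : Int :=
  ((PySem.List.enumerate (distances.zip fuel) 0).foldl (bStep mpg) (0, 0, 0)).2.1

-- ===== PRECONDITION & SPEC =====
-- Pre_ is exactly where the Python A returns: with fewer fuel entries than distances A
-- raises IndexError, and when the total balance is negative A's while-loop never
-- terminates (no valid start exists, so cities_covered never reaches n).
def Pre_validStartingCity (distances : List Int) (fuel : List Int) (mpg : Int) : Prop :=
  distances.length ≤ fuel.length ∧
  distances.sum ≤ (fuel.take distances.length).sum * mpg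
instance (distances : List Int) (fuel : List Int) (mpg : Int) : Decidable (Pre_validStartingCity distances fuel mpg) := by unfold Pre_validStartingCity; infer_instance

def pvWitness_validStartingCity : List Int × List Int × Int := ([1, 2], [1, 3], 1)

def Spec_validStartingCity (distances : List Int) (fuel : List Int) (mpg : Int) (out : Int) : Prop := out = validStartingCity_alt distances fuel mpg
instance (distances : List Int) (fuel : List Int) (mpg : Int) (out : Int) : Decidable (Spec_validStartingCity distances fuel mpg out) := by unfold Spec_validStartingCity; infer_instance

-- ===== CLAIM (what is proved, stated in full; the proofs are below) =====
def Claim_equal_validStartingCity : Prop := ∀ (distances : List Int) (fuel : List Int) (mpg : Int), Dom_validStartingCity distances fuel mpg → Pre_validStartingCity distances fuel mpg → Spec_validStartingCity distances fuel mpg (validStartingCity distances fuel mpg)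

-- ===== LEMMAS AND PROOFS =====

-- the per-city balance list g[i] = fuel[i]*mpg - distances[i]
def circG (d f : List Int) (m : Int) : List Int :=
  (d.zip f).map (fun p => p.2 * m - p.1)

-- prefix balance P l k = sum of the first k entries
def P (l : List Int) (k : Nat) : Int := (l.take k).sum

-- j is the first index (0..len) at which the prefix balance attains its minimum
def FirstMin (l : List Int) (j : Nat) : Prop :=
  j ≤ l.length ∧ (∀ k, k < j → P l j < P l k) ∧ (∀ k, j ≤ k → k ≤ l.length → P l j ≤ P l k)

lemma P_zero (l : List Int) : P l 0 = 0 := rfl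

lemma P_succ (l : List Int) (i : Nat) (h : i < l.length) :
    P l (i + 1) = P l i + l[i] := by
  rw [P, P, List.take_add_one, List.sum_append, List.getElem?_eq_getElem h]
  simp

lemma FirstMin_unique (l : List Int) (i j : Nat) (hi : FirstMin l i) (hj : FirstMin l j) :
    i = j := by
  rcases hi with ⟨hi1, hi2, hi3⟩
  rcases hj with ⟨hj1, hj2, hj3⟩
  rcases Nat.lt_trichotomy i j with h | h | h
  · exact absurd (hi3 j (Nat.le_of_lt h) hj1) (not_le.mpr (hj2 i h))
  · exact h
  · exact absurd (hj3 i (Nat.le_of_lt h) hi1) (not_le.mpr (hi2 j h))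

lemma circG_length (d f : List Int) (m : Int) :
    (circG d f m).length = (d.zip f).length := by simp [circG]

lemma circG_getElem (d f : List Int) (m : Int) (c : Nat) (h : c < (d.zip f).length) :
    (circG d f m)[c]'(by simpa [circG] using h)
      = f[c]'(by simp at h; omega) * m - d[c]'(by simp at h; omega) := by
  simp [circG]

-- B's fold computes the first minimum of the prefix balances
lemma foldB_inv (d f : List Int) (m : Int) :
    ∀ (suf : List (Int × Int)) (i besti : Nat),
      (d.zip f).drop i = suf → i ≤ (d.zip f).length → besti ≤ i →
      (∀ k, k < besti → P (circG d f m) besti < P (circG d f m) k) →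
      (∀ k, besti ≤ k → k ≤ i → P (circG d f m) besti ≤ P (circG d f m) k) →
      ∃ j : Nat, FirstMin (circG d f m) j ∧
        ((PySem.List.enumerate suf (i : Int)).foldl (bStep m)
          (P (circG d f m) besti, (besti : Int), P (circG d f m) i)).2.1 = (j : Int) := by
  intro suf
  induction suf with
  | nil =>
    intro i besti hdrop hi hb h2 h3
    have hil : (d.zip f).length ≤ i := by
      by_contra hlt
      push_neg at hlt
      have hc := List.drop_eq_getElem_cons hlt
      rw [hdrop] at hc
      exact List.cons_ne_nil _ _ hc.symm
    have hieq : i = (d.zip f).length := le_antisymm hi hil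
    refine ⟨besti, ⟨?_, h2, ?_⟩, by simp [PySem.List.enumerate]⟩
    · rw [circG_length]; omega
    · intro k hk1 hk2
      exact h3 k hk1 (by rw [circG_length] at hk2; omega)
  | cons p t ih =>
    intro i besti hdrop hi hb h2 h3
    have hlt : i < (d.zip f).length := by
      by_contra hge
      push_neg at hge
      rw [List.drop_eq_nil_of_le hge] at hdrop
      exact List.cons_ne_nil _ _ hdrop.symm
    have hcons := List.drop_eq_getElem_cons hlt
    rw [hdrop] at hcons
    obtain ⟨hp', ht'⟩ := List.cons.inj hcons
    have hp : (d.zip f)[i]'hlt = p := hp'.symm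
    have ht : (d.zip f).drop (i + 1) = t := ht'.symm
    have hclt : i < (circG d f m).length := by rw [circG_length]; exact hlt
    have hg : (circG d f m)[i]'hclt = p.2 * m - p.1 := by
      simp only [circG, List.getElem_map, hp]
    have hPs : P (circG d f m) (i + 1) = P (circG d f m) i + (p.2 * m - p.1) := by
      rw [P_succ _ _ hclt, hg]
    rw [PySem.List.enumerate_cons, List.foldl_cons]
    simp only [bStep]
    have e1 : P (circG d f m) i + p.2 * m - p.1 = P (circG d f m) (i + 1) := by
      rw [hPs]; ring
    rw [e1]
    by_cases hlt2 : P (circG d f m) (i + 1) < P (circG d f m) besti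
    · rw [if_pos hlt2]
      have hcast : ((i : Int) + 1) = (((i + 1 : Nat)) : Int) := by push_cast; ring
      rw [hcast]
      exact ih (i + 1) (i + 1) ht (by omega) le_rfl
        (by
          intro k hk
          rcases Nat.lt_or_ge k besti with hkb | hkb
          · exact lt_trans hlt2 (h2 k hkb)
          · exact lt_of_lt_of_le hlt2 (h3 k hkb (by omega)))
        (by intro k hk1 hk2; have : k = i + 1 := by omega
            rw [this])
    · rw [if_neg hlt2]
      have hcast : ((i : Int) + 1) = (((i + 1 : Nat)) : Int) := by push_cast; ring
      rw [hcast]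
      exact ih (i + 1) besti ht (by omega) (by omega) h2
        (by
          intro k hk1 hk2
          rcases Nat.lt_or_ge k (i + 1) with hki | hki
          · exact h3 k hk1 (by omega)
          · have : k = i + 1 := by omega
            rw [this]; exact not_lt.mp hlt2)

lemma pyGet_nat (xs : List Int) (c : Nat) (h : c < xs.length) :
    (PySem.List.pyGet? xs (c : Int)).getD 0 = xs[c] := by
  simp [PySem.List.pyGet?_natCast, List.getElem?_eq_getElem h]

-- A's loop returns the first minimum index, given the loop invariant
lemma aLoop_main (d f : List Int) (m : Int) (j : Nat)
    (hzl : (d.zip f).length = d.length)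
    (hS : 0 ≤ P (circG d f m) (circG d f m).length)
    (hj : FirstMin (circG d f m) j) :
    ∀ (steps : Nat) (sN cN : Nat) (dtc fa covered : Int),
      ((sN ≤ cN ∧ cN ≤ (circG d f m).length ∧ covered = (cN : Int) - (sN : Int) ∧
        fa - dtc = P (circG d f m) cN - P (circG d f m) sN ∧
        (∀ k, k < sN → P (circG d f m) sN < P (circG d f m) k) ∧
        (∀ k, sN ≤ k → k ≤ cN → P (circG d f m) sN ≤ P (circG d f m) k) ∧
        2 * (circG d f m).length + 1 - cN < steps)
      ∨ (cN ≤ sN ∧ sN ≤ (circG d f m).length ∧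
        covered = ((circG d f m).length : Int) - (sN : Int) + (cN : Int) ∧
        fa - dtc = P (circG d f m) (circG d f m).length - P (circG d f m) sN + P (circG d f m) cN ∧
        FirstMin (circG d f m) sN ∧
        sN - cN < steps)) →
      aLoop d f m (d.length : Int) steps dtc fa (sN : Int) (cN : Int) covered = (j : Int) := by
  have hnl : (circG d f m).length = d.length := by rw [circG_length, hzl]
  have hdf : d.length ≤ f.length := by
    have := List.length_zip (l₁ := d) (l₂ := f); omega
  intro steps
  induction steps with
  | zero =>
    intro sN cN dtc fa covered hinv
    rcases hinv with ⟨_, _, _, _, _, _, hm⟩ | ⟨_, _, _, _, _, hm⟩ <;> omega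
  | succ steps ih =>
    intro sN cN dtc fa covered hinv
    rw [aLoop]
    dsimp only
    rcases hinv with ⟨h1, h2, h3, h4, h5, h6, hm⟩ | ⟨h1, h2, h3, h4, h5, hm⟩
    · -- phase 1
      by_cases hex : covered < (d.length : Int)
      · rw [if_pos hex]
        by_cases hcn : cN = (circG d f m).length
        · -- wrap: cur becomes 0, then city 0 is processed; cannot fail since the
          -- candidate sN is a prefix-minimum and the total balance is ≥ 0
          have hcur : (cN : Int) = (d.length : Int) := by rw [hcn, hnl]
          rw [if_pos hcur]
          have hlen1 : 1 ≤ d.length := by omega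
          have h0d : (0 : Nat) < d.length := hlen1
          have h0f : (0 : Nat) < f.length := by omega
          have hg0d : (PySem.List.pyGet? d (0 : Int)).getD 0 = d[0]'h0d := by
            simpa using pyGet_nat d 0 h0d
          have hg0f : (PySem.List.pyGet? f (0 : Int)).getD 0 = f[0]'h0f := by
            simpa using pyGet_nat f 0 h0f
          rw [hg0d, hg0f]
          have h0c : (0 : Nat) < (d.zip f).length := by omega
          have hP1 : P (circG d f m) 1 = f[0] * m - d[0] := by
            have := P_succ (circG d f m) 0 (by omega)
            rw [circG_getElem d f m 0 h0c] at this
            rw [this, P_zero]; ring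
          have hs1 : 1 ≤ sN := by omega
          have hPs1 : P (circG d f m) sN ≤ P (circG d f m) 1 := by
            rcases Nat.lt_or_ge 1 sN with hc | hc
            · exact le_of_lt (h5 1 hc)
            · exact h6 1 (by omega) (by omega)
          have hnofail : ¬ (fa + f[0] * m < dtc + d[0]) := by
            have hb : fa - dtc = P (circG d f m) (circG d f m).length - P (circG d f m) sN := by
              rw [← hcn]; exact h4
            have := hS
            push Not
            have e : fa + f[0] * m - (dtc + d[0]) =
                P (circG d f m) (circG d f m).length - P (circG d f m) sN +
                  P (circG d f m) 1 := by rw [hP1] at *; linarith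
            linarith
          rw [if_neg hnofail]
          have hc1 : (0 : Int) + 1 = ((1 : Nat) : Int) := by norm_num
          rw [hc1]
          apply ih
          refine Or.inr ⟨hs1, by omega, by push_cast; omega, ?_, ⟨by omega, h5, ?_⟩, by omega⟩
          · rw [hP1]
            have hb : fa - dtc = P (circG d f m) (circG d f m).length - P (circG d f m) sN := by
              rw [← hcn]; exact h4
            linarith
          · intro k hk1 hk2
            exact h6 k hk1 (by omega)
        · -- normal phase-1 step at city cN < n
          have hcl : cN < (circG d f m).length := by omega
          have hcur : ¬ ((cN : Int) = (d.length : Int)) := by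
            intro hcontra
            exact hcn (by omega)
          rw [if_neg hcur]
          have hcd : cN < d.length := by omega
          have hcf : cN < f.length := by omega
          have hcz : cN < (d.zip f).length := by omega
          rw [pyGet_nat d cN hcd, pyGet_nat f cN hcf]
          have key : fa + f[cN] * m - (dtc + d[cN]) =
              P (circG d f m) (cN + 1) - P (circG d f m) sN := by
            have := P_succ (circG d f m) cN hcl
            rw [circG_getElem d f m cN hcz] at this
            rw [this]; linarith
          by_cases hPc : P (circG d f m) (cN + 1) < P (circG d f m) sN
          · rw [if_pos (by linarith)]
            have hc1 : (cN : Int) + 1 = ((cN + 1 : Nat) : Int) := by push_cast; ring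
            rw [hc1]
            apply ih
            refine Or.inl ⟨le_rfl, by omega, by push_cast; ring, by ring_nf, ?_, ?_, by omega⟩
            · intro k hk
              rcases Nat.lt_or_ge k sN with hks | hks
              · exact lt_trans hPc (h5 k hks)
              · exact lt_of_lt_of_le hPc (h6 k hks (by omega))
            · intro k hk1 hk2
              have : k = cN + 1 := by omega
              rw [this]
          · rw [if_neg (by linarith)]
            have hc1 : (cN : Int) + 1 = ((cN + 1 : Nat) : Int) := by push_cast; ring
            rw [hc1]
            apply ih
            refine Or.inl ⟨by omega, by omega, by push_cast; omega, by linarith, h5, ?_, by omega⟩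
            intro k hk1 hk2
            rcases Nat.lt_or_ge k (cN + 1) with hki | hki
            · exact h6 k hk1 (by omega)
            · have : k = cN + 1 := by omega
              rw [this]; exact not_lt.mp hPc
      · -- phase-1 exit: covered ≥ n forces sN = 0, cN = n; the start 0 is the first minimum
        rw [if_neg hex]
        have hsz : sN = 0 ∧ cN = (circG d f m).length := by
          rw [h3] at hex; constructor <;> omega
        obtain ⟨hs0, hcn⟩ := hsz
        have hf0 : FirstMin (circG d f m) 0 :=
          ⟨Nat.zero_le _, fun k hk => absurd hk (Nat.not_lt_zero k),
           fun k hk1 hk2 => hs0 ▸ h6 k (hs0 ▸ Nat.zero_le k) (by omega)⟩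
        have hj0 : j = 0 := FirstMin_unique _ j 0 hj hf0
        rw [hs0, hj0]
    · -- phase 2
      by_cases hex : covered < (d.length : Int)
      · rw [if_pos hex]
        have hcs : cN < sN := by rw [h3] at hex; omega
        have hcl : cN < (circG d f m).length := by omega
        have hcur : ¬ ((cN : Int) = (d.length : Int)) := by
          intro hcontra
          omega
        rw [if_neg hcur]
        have hcd : cN < d.length := by omega
        have hcf : cN < f.length := by omega
        have hcz : cN < (d.zip f).length := by omega
        rw [pyGet_nat d cN hcd, pyGet_nat f cN hcf]
        have key : fa + f[cN] * m - (dtc + d[cN]) =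
            P (circG d f m) (circG d f m).length - P (circG d f m) sN +
              P (circG d f m) (cN + 1) := by
          have := P_succ (circG d f m) cN hcl
          rw [circG_getElem d f m cN hcz] at this
          rw [this]; linarith
        have hPge : P (circG d f m) sN ≤ P (circG d f m) (cN + 1) := by
          rcases Nat.lt_or_ge (cN + 1) sN with hc | hc
          · exact le_of_lt (h5.2.1 (cN + 1) hc)
          · have : cN + 1 = sN := by omega
            rw [this]
        have hnofail : ¬ (fa + f[cN] * m < dtc + d[cN]) := by
          have := hS; push Not; linarith
        rw [if_neg hnofail]
        have hc1 : (cN : Int) + 1 = ((cN + 1 : Nat) : Int) := by push_cast; ring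
        rw [hc1]
        apply ih
        exact Or.inr ⟨by omega, h2, by push_cast; omega, by linarith, h5, by omega⟩
      · -- phase-2 exit: covered ≥ n forces cN = sN; return sN, the first minimum
        rw [if_neg hex]
        have : sN = j := FirstMin_unique _ sN j h5 hj
        rw [this]

lemma circG_sum (d f : List Int) (m : Int) (h : d.length ≤ f.length) :
    (circG d f m).sum = (f.take d.length).sum * m - d.sum := by
  induction d generalizing f with
  | nil => simp [circG]
  | cons a d ih =>
    cases f with
    | nil => simp at h
    | cons b f =>
      have h' : d.length ≤ f.length := by simpa using h
      have e : circG (a :: d) (b :: f) m = (b * m - a) :: circG d f m := by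
        simp [circG]
      rw [e, List.sum_cons, ih f h', List.length_cons, List.take_succ_cons,
        List.sum_cons, List.sum_cons]
      ring

-- ===== VERDICT (by name: the statement is the Claim_ definition above) =====
theorem validStartingCity_spec : Claim_equal_validStartingCity := by
  intro d f m _hdom hpre
  obtain ⟨hlen, hsum⟩ := hpre
  have hzl : (d.zip f).length = d.length := by
    rw [List.length_zip]; omega
  have hnl : (circG d f m).length = d.length := by rw [circG_length, hzl]
  obtain ⟨j, hj, hB⟩ := foldB_inv d f m (d.zip f) 0 0 (by simp) (Nat.zero_le _) le_rfl
    (fun k hk => absurd hk (Nat.not_lt_zero k))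
    (by intro k _ hk; have : k = 0 := Nat.le_zero.mp hk; rw [this])
  have hBeq : validStartingCity_alt d f m = (j : Int) := by
    unfold validStartingCity_alt
    simpa [P_zero] using hB
  have hS : 0 ≤ P (circG d f m) (circG d f m).length := by
    rw [P, List.take_length, circG_sum d f m hlen]
    linarith
  have hA := aLoop_main d f m j hzl hS hj (2 * d.length + 2) 0 0 0 0 0
    (Or.inl ⟨le_rfl, Nat.zero_le _, by norm_num, by simp [P_zero],
      fun k hk => absurd hk (Nat.not_lt_zero k),
      (by intro k _ hk; have : k = 0 := Nat.le_zero.mp hk; rw [this]),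
      by omega⟩)
  show validStartingCity d f m = validStartingCity_alt d f m
  unfold validStartingCity
  rw [hBeq]
  simpa using hA
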